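-- pv_equiv track=rewrite | github.com/devsulemangondal/dish_genie | sync_translations_from_web.py | convert_to_arb_key
-- ===== SOURCE A (Python) =====
-- def convert_to_arb_key(json_key):
--     """Convert JSON key (e.g., 'common.home') to ARB key (e.g., 'commonHome')"""
--     parts = json_key.split('.')
--     if not parts:
--         return ""
--
--     # First part stays lowercase, subsequent parts are capitalized
--     result = parts[0]
--     for part in parts[1:]:
--         if part:
--             result += part[0].upper() + part[1:]
--     return result
-- ===== SOURCE B (Python) =====
-- def convert_to_arb_key(json_key):
--     out = []
--     capitalize_next = False
--     for ch in json_key: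
--         if ch == '.':
--             capitalize_next = True
--         else:
--             out.append(ch.upper() if capitalize_next else ch)
--             capitalize_next = False
--     return ''.join(out)
-- ===== Notes on version B (the rewrite author's own statement) =====
-- stated objective: idiomatic
-- what changed: Replaces split-on-dot plus a loop over parts with a single character scan carrying a capitalize_next flag.
import Mathlib
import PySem

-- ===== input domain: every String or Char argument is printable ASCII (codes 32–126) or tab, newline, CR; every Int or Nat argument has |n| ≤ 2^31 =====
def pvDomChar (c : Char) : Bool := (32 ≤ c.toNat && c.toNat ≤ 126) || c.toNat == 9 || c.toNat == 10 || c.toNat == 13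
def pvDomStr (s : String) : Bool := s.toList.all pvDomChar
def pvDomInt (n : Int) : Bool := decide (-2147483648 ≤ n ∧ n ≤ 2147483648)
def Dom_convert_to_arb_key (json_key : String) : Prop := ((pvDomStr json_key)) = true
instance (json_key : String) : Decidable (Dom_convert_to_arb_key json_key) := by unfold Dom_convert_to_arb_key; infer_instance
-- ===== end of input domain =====

-- B replaces the split-on-dot-and-rejoin of A by a single character scan with a
-- capitalize-next flag (idiomatic single pass); return values are proved equal on all inputs.

-- ===== PORT A =====
-- literal port of A: split on '.', keep first part, capitalize the first char of later nonempty parts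
def convert_to_arb_key (json_key : String) : String :=
  let parts := PySem.Chars.splitOn json_key.toList ['.']
  match parts with
  | [] => ""
  | p0 :: rest =>
      String.ofList (rest.foldl (fun result part =>
        match part with
        | [] => result
        | c :: cs => result ++ (PySem.Chars.upperChar c :: cs)) p0)

-- ===== PORT B =====
-- literal port of B: one scan, state = (output chars so far, capitalize_next flag)
def convert_to_arb_key_alt (json_key : String) : String :=
  let st := json_key.toList.foldl (fun (st : List Char × Bool) ch =>
      if ch = '.' then (st.1, true)
      else (st.1 ++ [if st.2 then PySem.Chars.upperChar ch else ch], false)) ([], false)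
  String.ofList st.1

-- ===== PRECONDITION & SPEC =====
def Spec_convert_to_arb_key (json_key : String) (out : String) : Prop := out = convert_to_arb_key_alt json_key
instance (json_key : String) (out : String) : Decidable (Spec_convert_to_arb_key json_key out) := by unfold Spec_convert_to_arb_key; infer_instance

-- ===== CLAIM (what is proved, stated in full; the proofs are below) =====
def Claim_equal_convert_to_arb_key : Prop := ∀ (json_key : String), Dom_convert_to_arb_key json_key → Spec_convert_to_arb_key json_key (convert_to_arb_key json_key)

-- ===== LEMMAS AND PROOFS =====

-- recursive characterisation of splitting on a single '.'
def dsplit : List Char → List (List Char)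
  | [] => [[]]
  | c :: r => if c = '.' then [] :: dsplit r
              else match dsplit r with
                   | p :: ps => (c :: p) :: ps
                   | [] => [[c]]

-- prepend a prefix onto the first piece
def consHead (pre : List Char) : List (List Char) → List (List Char)
  | p :: ps => (pre ++ p) :: ps
  | [] => [pre]

-- B's scan, written as a recursion
def scanB : List Char → Bool → List Char
  | [], _ => []
  | c :: r, flag =>
      if c = '.' then scanB r true
      else (if flag then PySem.Chars.upperChar c else c) :: scanB r false

-- capitalize the first char of a nonempty part
def cap : List Char → List Char
  | [] => []
  | c :: cs => PySem.Chars.upperChar c :: cs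

lemma dsplit_ne_nil (l : List Char) : dsplit l ≠ [] := by
  cases l with
  | nil => simp [dsplit]
  | cons c r =>
    simp only [dsplit]
    split
    · simp
    · split <;> simp

lemma splitOn_go_dot (fuel : Nat) :
    ∀ (l cur : List Char) (acc : List (List Char)), l.length ≤ fuel →
      PySem.Chars.splitOn.go ['.'] fuel l cur acc
        = acc.reverse ++ consHead cur.reverse (dsplit l) := by
  induction fuel with
  | zero =>
    intro l cur acc h
    have : l = [] := List.eq_nil_of_length_eq_zero (Nat.le_zero.mp h)
    subst this
    simp [PySem.Chars.splitOn.go, dsplit, consHead]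
  | succ f ih =>
    intro l cur acc h
    cases l with
    | nil => simp [PySem.Chars.splitOn.go, dsplit, consHead]
    | cons c r =>
      by_cases hc : c = '.'
      · subst hc
        have hpre : ['.'].isPrefixOf ('.' :: r) = true := by
          simp [List.isPrefixOf]
        rw [PySem.Chars.splitOn.go]
        simp only [hpre, if_true, List.length_cons] at *
        simp only [List.length_nil, List.length_cons, Nat.zero_add, List.drop_succ_cons,
          List.drop_zero]
        rw [ih r [] (cur.reverse :: acc) (Nat.le_of_succ_le_succ h)]
        have hne := dsplit_ne_nil r
        cases hd : dsplit r with
        | nil => exact absurd hd hne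
        | cons p ps =>
          simp [dsplit, consHead, hd]
      · have hpre : ['.'].isPrefixOf (c :: r) = false := by
          simp [List.isPrefixOf]
          intro hcc; exact hc hcc.symm
        rw [PySem.Chars.splitOn.go]
        simp only [hpre, Bool.false_eq_true, if_false]
        rw [ih r (c :: cur) acc (by simpa using Nat.le_of_succ_le_succ h)]
        have hne := dsplit_ne_nil r
        cases hd : dsplit r with
        | nil => exact absurd hd hne
        | cons p ps =>
          simp [dsplit, consHead, hd, hc]
  
lemma splitOn_dot (l : List Char) :
    PySem.Chars.splitOn l ['.'] = dsplit l := by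
  unfold PySem.Chars.splitOn
  rw [splitOn_go_dot (l.length + 1) l [] [] (Nat.le_succ _)]
  have hne := dsplit_ne_nil l
  cases hd : dsplit l with
  | nil => exact absurd hd hne
  | cons p ps => simp [consHead]

-- A's foldl over the tail parts appends the capitalisation of each part
lemma foldA_eq (rest : List (List Char)) : ∀ (p0 : List Char),
    rest.foldl (fun result part =>
        match part with
        | [] => result
        | c :: cs => result ++ (PySem.Chars.upperChar c :: cs)) p0
      = p0 ++ rest.flatMap cap := by
  induction rest with
  | nil => intro p0; simp
  | cons p ps ih =>
    intro p0
    cases p with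
    | nil => simp [List.foldl, ih, cap]
    | cons c cs => simp [List.foldl, ih, cap]

-- B's foldl computes scanB with an accumulator
lemma foldB_eq (l : List Char) : ∀ (acc : List Char) (flag : Bool),
    (l.foldl (fun (st : List Char × Bool) ch =>
        if ch = '.' then (st.1, true)
        else (st.1 ++ [if st.2 then PySem.Chars.upperChar ch else ch], false)) (acc, flag)).1
      = acc ++ scanB l flag := by
  induction l with
  | nil => intro acc flag; simp [scanB]
  | cons c r ih =>
    intro acc flag
    by_cases hc : c = '.'
    · subst hc; simp [List.foldl, scanB, ih]
    · simp [List.foldl, scanB, hc, ih]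

-- the two sides agree: A's value on dsplit equals scanB with flag false,
-- and full capitalisation of all pieces equals scanB with flag true
lemma main_eq (l : List Char) :
    (match dsplit l with
     | [] => []
     | p0 :: rest => p0 ++ rest.flatMap cap) = scanB l false
    ∧ (dsplit l).flatMap cap = scanB l true := by
  induction l with
  | nil => simp [dsplit, scanB, cap]
  | cons c r ih =>
    obtain ⟨ih1, ih2⟩ := ih
    by_cases hc : c = '.'
    · subst hc
      constructor
      · simpa [dsplit, scanB] using ih2
      · simpa [dsplit, scanB, cap] using ih2
    · have hne := dsplit_ne_nil r
      cases hd : dsplit r with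
      | nil => exact absurd hd hne
      | cons p ps =>
        rw [hd] at ih1 ih2
        constructor
        · simp only [dsplit, hc, if_false, hd]
          simpa [scanB, hc] using ih1
        · simp only [dsplit, hc, if_false, hd]
          simpa [scanB, hc, cap] using ih1

-- ===== VERDICT (by name: the statement is the Claim_ definition above) =====
theorem convert_to_arb_key_spec : Claim_equal_convert_to_arb_key := by
  intro s _
  unfold Spec_convert_to_arb_key convert_to_arb_key convert_to_arb_key_alt
  simp only [splitOn_dot, foldB_eq, List.nil_append]
  have h := main_eq s.toList
  have hne := dsplit_ne_nil s.toList
  cases hd : dsplit s.toList with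
  | nil => exact absurd hd hne
  | cons p ps =>
    rw [hd] at h
    refine congrArg String.ofList ?_
    rw [foldA_eq]
    exact h.1
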